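-- pv_equiv track=rewrite | github.com/Azure/azure-cli | src/azure/cli/_argparse.py | _read_arg
-- ===== SOURCE A (Python) =====
-- ARG_PREFIXES = sorted(('-', '--', '/'), key=len, reverse=True)
--
-- ARG_SEPARATORS = ':='
--
-- def _read_arg(string):
--     for prefix in ARG_PREFIXES:
--         if string.startswith(prefix):
--             a1, a2 = string, None
--             indices = sorted((a1.find(sep), sep) for sep in ARG_SEPARATORS)
--             sep = next((i[1] for i in indices if i[0] > len(prefix)), None)
--             if sep:
--                 a1, _, a2 = a1.partition(sep)
--             return a1[len(prefix):].lower(), a2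
--     return None, None
-- ===== SOURCE B (Python) =====
-- ARG_PREFIXES = ('--', '-', '/')
--
-- ARG_SEPARATORS = ':='
--
-- def _read_arg(string):
--     for prefix in ARG_PREFIXES:
--         if string.startswith(prefix):
--             rest = string[len(prefix):]
--             for i in range(1, len(rest)):
--                 if rest[i] in ARG_SEPARATORS:
--                     return rest[:i].lower(), rest[i + 1:]
--             return rest.lower(), None
--     return None, None
-- ===== Notes on version B (the rewrite author's own statement) =====
-- stated objective: simpler
-- what changed: Replaces A's per-separator whole-string find, tuple sort and str.partition with a single left-to-right scan of the prefix-stripped remainder that splits at the first separator character at index >= 1.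
-- intended difference: When the character right after the prefix is a separator whose next separator occurrence in the remainder is that same character (witness "-::"), A's first-occurrence test disqualifies that separator character entirely, so A keeps it unsplit inside the name, while B splits at the first separator at index >= 1 of the remainder, the intended parse. — e.g. on _read_arg("-::"): A returns (some "::", none), B returns (some ":", some "")
import Mathlib
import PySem

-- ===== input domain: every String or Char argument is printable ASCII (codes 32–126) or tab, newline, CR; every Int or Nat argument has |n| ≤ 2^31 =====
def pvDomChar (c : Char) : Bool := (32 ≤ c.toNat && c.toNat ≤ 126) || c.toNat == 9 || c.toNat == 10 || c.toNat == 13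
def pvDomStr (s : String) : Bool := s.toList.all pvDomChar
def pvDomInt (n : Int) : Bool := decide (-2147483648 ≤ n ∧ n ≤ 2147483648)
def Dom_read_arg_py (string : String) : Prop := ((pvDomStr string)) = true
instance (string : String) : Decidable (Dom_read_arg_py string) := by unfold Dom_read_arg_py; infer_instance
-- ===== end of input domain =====

-- B replaces A's per-separator find / sort / partition machinery by one left-to-right
-- scan of the prefix-stripped remainder (objective: simpler); on the D_ corner below the
-- two return different values (B's split is the intended one).

-- ===== PORT A =====
-- str.partition(sep), ported by hand step for step (exact: split at the first
-- occurrence of sep, or (s, '', '') when sep does not occur).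
def pyPartition (s sep : String) : String × String × String :=
  if PySem.Str.find s sep = -1 then (s, "", "")
  else (PySem.Str.slice s none (some (PySem.Str.find s sep)), sep,
        PySem.Str.slice s (some (PySem.Str.find s sep + PySem.Str.len sep)) none)

-- the `for prefix in ARG_PREFIXES` loop (ARG_PREFIXES sorted by len, reverse = ["--","-","/"]);
-- a1 = string and a2 = None are inlined, partition's pieces are taken by projection.
def readArgLoopA (string : String) : List String → Option String × Option String
  | [] => (none, none)
  | pre :: rest =>
    if PySem.Str.startswith string pre then
      -- indices = sorted((a1.find(sep), sep) for sep in ':=');  sep = next((i[1] for i in indices if i[0] > len(prefix)), None)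
      match (PySem.List.sorted2
          [(PySem.Str.find string ":", (":" : String)), (PySem.Str.find string "=", "=")]
          Prod.fst Prod.snd).findSome?
          (fun i => if i.1 > PySem.Str.len pre then some i.2 else none) with
      | some sp =>
        -- a1, _, a2 = a1.partition(sep);  return a1[len(prefix):].lower(), a2
        (some (PySem.Str.lower (PySem.Str.slice (pyPartition string sp).1 (some (PySem.Str.len pre)) none)),
         some (pyPartition string sp).2.2)
      | none =>
        (some (PySem.Str.lower (PySem.Str.slice string (some (PySem.Str.len pre)) none)), none)
    else readArgLoopA string rest

def read_arg_py (string : String) : Option String × Option String :=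
  readArgLoopA string ["--", "-", "/"]

-- ===== PORT B =====
-- the `for i in range(1, len(rest))` scan: first separator character at index ≥ 1 of rest
-- (scanning the tail of rest position by position)
def altScan : List Char → Option (List Char × List Char)
  | [] => none
  | c :: cs =>
    if c = ':' ∨ c = '=' then some ([], cs)
    else (altScan cs).map (fun p => (c :: p.1, p.2))

def readArgLoopB (string : String) : List String → Option String × Option String
  | [] => (none, none)
  | pre :: rest =>
    if PySem.Str.startswith string pre then
      -- rest = string[len(prefix):]
      match PySem.Chars.slice string.toList (some (PySem.Str.len pre)) none with
      | [] => (some (String.ofList (PySem.Chars.lower [])), none)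
      | c0 :: cs =>
        match altScan cs with
        | some (preName, post) =>
            (some (String.ofList (PySem.Chars.lower (c0 :: preName))), some (String.ofList post))
        | none => (some (String.ofList (PySem.Chars.lower (c0 :: cs))), none)
    else readArgLoopB string rest

def read_arg_py_alt (string : String) : Option String × Option String :=
  readArgLoopB string ["--", "-", "/"]

-- ===== PRECONDITION & SPEC =====
-- When the character right after the prefix is a separator whose next separator occurrence in
-- the remainder is that same character (witness "-::"), A's first-occurrence test disqualifies
-- that separator character entirely, so A keeps it unsplit inside the name, while B splits at
-- the first separator at index ≥ 1 of the remainder, the intended parse.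
def sepChar (c : Char) : Bool := c == ':' || c == '='

def badRest : List Char → Bool
  | [] => false
  | c0 :: cs =>
    sepChar c0 &&
      (match cs.findIdx? sepChar with
       | none => false
       | some i => cs[i]? == some c0)

def D_read_arg_py (string : String) : Prop :=
  (if ['-', '-'].isPrefixOf string.toList then badRest (string.toList.drop 2)
   else if ['-'].isPrefixOf string.toList then badRest (string.toList.drop 1)
   else if ['/'].isPrefixOf string.toList then badRest (string.toList.drop 1)
   else false) = true
instance (string : String) : Decidable (D_read_arg_py string) := by unfold D_read_arg_py; infer_instance

def Spec_read_arg_py (string : String) (out : Option String × Option String) : Prop := ¬ D_read_arg_py string → out = read_arg_py_alt string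
instance (string : String) (out : Option String × Option String) : Decidable (Spec_read_arg_py string out) := by unfold Spec_read_arg_py; infer_instance

def pvDiffWitness_read_arg_py : String := "-::"
def pvDiffWitnessOut_read_arg_py : (Option String × Option String) × (Option String × Option String) :=
  ((some "::", none), (some ":", some ""))

-- ===== CLAIM (what is proved, stated in full; the proofs are below) =====
def Claim_unchanged_read_arg_py : Prop := ∀ (string : String), Dom_read_arg_py string → Spec_read_arg_py string (read_arg_py string)
def Claim_changed_read_arg_py : Prop := Dom_read_arg_py (pvDiffWitness_read_arg_py) ∧ D_read_arg_py (pvDiffWitness_read_arg_py) ∧ read_arg_py (pvDiffWitness_read_arg_py) = pvDiffWitnessOut_read_arg_py.1 ∧ read_arg_py_alt (pvDiffWitness_read_arg_py) = pvDiffWitnessOut_read_arg_py.2 ∧ pvDiffWitnessOut_read_arg_py.1 ≠ pvDiffWitnessOut_read_arg_py.2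
def Claim_exact_read_arg_py : Prop := ∀ (string : String), Dom_read_arg_py string → D_read_arg_py string → read_arg_py string ≠ read_arg_py_alt string

-- ===== LEMMAS AND PROOFS =====
-- [c] <+: l.drop j ↔ l[j]? = some c
theorem singleton_prefix_drop_iff (l : List Char) (j : Nat) (c : Char) :
    [c] <+: l.drop j ↔ l[j]? = some c := by
  rw [← List.head?_drop]
  constructor
  · rintro ⟨t, ht⟩
    cases h : (l.drop j) with
    | nil => simp [h] at ht
    | cons x xs => rw [h] at ht; cases ht; simp [h]
  · intro h
    cases hd : (l.drop j) with
    | nil => simp [hd] at h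
    | cons x xs => rw [hd] at h; simp at h; subst h; exact ⟨xs, rfl⟩

theorem singleton_infix_iff (l : List Char) (c : Char) : [c] <:+: l ↔ c ∈ l := by
  constructor
  · intro h; exact h.subset (List.mem_singleton_self c)
  · intro h
    obtain ⟨s, t, rfl⟩ := List.append_of_mem h
    exact ⟨s, t, by simp⟩

-- Chars.find with a single-character needle is findIdx?
theorem find_singleton (l : List Char) (c : Char) :
    PySem.Chars.find l [c] =
      (match l.findIdx? (fun x => x == c) with
        | none => -1
        | some i => (i : Int)) := by
  cases h : l.findIdx? (fun x => x == c) with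
  | none =>
    have hnone : ∀ x ∈ l, ¬ x = c := by simpa using List.findIdx?_eq_none_iff.mp h
    have : ¬ c ∈ l := fun hm => (hnone c hm) rfl
    simpa using (PySem.Chars.find_eq_neg_one_iff l [c]).mpr
      (by rw [singleton_infix_iff]; exact this)
  | some i =>
    obtain ⟨hilen, hic, hmin⟩ := List.findIdx?_eq_some_iff_getElem.mp h
    have hmem : c ∈ l := by
      have : l[i] = c := by simpa using hic
      exact this ▸ List.getElem_mem hilen
    have h0 : 0 ≤ PySem.Chars.find l [c] :=
      (PySem.Chars.find_nonneg_iff l [c]).mpr ((singleton_infix_iff l c).mpr hmem)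
    obtain ⟨hpref, hminf⟩ := PySem.Chars.find_spec h0
    have hfi : (PySem.Chars.find l [c]).toNat = i := by
      apply le_antisymm
      · by_contra hlt
        push_neg at hlt
        refine hminf i hlt ?_
        rw [singleton_prefix_drop_iff]
        rw [List.getElem?_eq_getElem hilen]
        simpa using hic
      · by_contra hlt
        push_neg at hlt
        have hlen2 : (PySem.Chars.find l [c]).toNat < l.length := lt_trans hlt hilen
        apply hmin _ hlt
        have hp2 := (singleton_prefix_drop_iff l (PySem.Chars.find l [c]).toNat c).mp hpref
        rw [List.getElem?_eq_getElem hlen2] at hp2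
        simp only [Option.some.injEq] at hp2
        simp [hp2]
    simp only []
    omega

-- not-found on the left part of an append
theorem findIdx?_append_left_none {p : Char → Bool} (pre r : List Char)
    (h : ∀ x ∈ pre, p x = false) :
    (pre ++ r).findIdx? p = (r.findIdx? p).map (fun i => i + pre.length) := by
  rw [List.findIdx?_append, List.findIdx?_eq_none_iff.mpr h]
  rfl

theorem altScan_eq (cs : List Char) :
    altScan cs =
      (cs.findIdx? sepChar).map (fun i => (cs.take i, cs.drop (i + 1))) := by
  induction cs with
  | nil => rfl
  | cons c cs ih =>
    rw [List.findIdx?_cons]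
    by_cases h : c = ':' ∨ c = '='
    · have hs : sepChar c = true := by rcases h with h | h <;> simp [sepChar, h]
      simp [altScan, h, hs]
    · have hs : sepChar c = false := by
        push_neg at h
        simp [sepChar, h.1, h.2]
      rw [altScan, if_neg h, ih]
      simp only [hs, Bool.false_eq_true, if_false, Option.map_map]
      cases cs.findIdx? sepChar with
      | none => rfl
      | some i => simp [Function.comp, List.take_succ_cons, List.drop_succ_cons]

theorem findIdx?_or_merge (cs : List Char) (a b : Char) :
    cs.findIdx? (fun c => c == a || c == b) =
      (match cs.findIdx? (fun c => c == a), cs.findIdx? (fun c => c == b) with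
        | none, none => none
        | some i, none => some i
        | none, some j => some j
        | some i, some j => some (min i j)) := by
  induction cs with
  | nil => rfl
  | cons c cs ih =>
    cases h1 : cs.findIdx? (fun c => c == a) <;> cases h2 : cs.findIdx? (fun c => c == b) <;>
      rw [h1, h2] at ih <;>
      by_cases ha : c = a <;> by_cases hb : c = b <;>
      simp [List.findIdx?_cons, ha, hb, h1, h2, ih] <;>
      (try (by_cases hab : a = b <;> simp [hab])) <;>
      (try (by_cases hba : b = a <;> simp [hba])) <;>
      (try omega)

theorem sep_eval (np fc fe : Int) (hne : fc = fe → fc ≤ np) :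
    (PySem.List.sorted2 [((fc, (":" : String))), (fe, "=")] Prod.fst Prod.snd).findSome?
        (fun i => if i.1 > np then some i.2 else none)
    = (if fc > np ∧ (fe ≤ np ∨ fc < fe) then some ":"
       else if fe > np then some "=" else none) := by
  have hpair : PySem.List.sorted2 [((fc, (":" : String))), (fe, "=")] Prod.fst Prod.snd =
      if (decide (fe < fc) || (!decide (fc < fe) && decide ((("=" : String)) < ":")))
      then [(fe, "="), (fc, ":")] else [(fc, ":"), (fe, "=")] := rfl
  rw [hpair]
  by_cases hb : (decide (fe < fc) || (!decide (fc < fe) && decide ((("=" : String)) < ":"))) = true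
  · rw [if_pos hb]
    have hfe : fe ≤ fc := by
      rcases Bool.or_eq_true_iff.mp hb with h | h
      · exact le_of_lt (of_decide_eq_true h)
      · have h' := (Bool.and_eq_true_iff.mp h).1
        simp only [Bool.not_eq_true', decide_eq_false_iff_not] at h'
        omega
    simp only [List.findSome?_cons]
    split_ifs <;> simp_all <;> omega
  · rw [if_neg hb]
    have hfc : fc ≤ fe := by
      by_contra hc
      exact hb (Bool.or_eq_true_iff.mpr (Or.inl (decide_eq_true (by omega))))
    simp only [List.findSome?_cons]
    split_ifs <;> simp_all <;> omega

theorem A_none_eval (s pre : String) (r0 : List Char) (hs : s.toList = pre.toList ++ r0) :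
    PySem.Str.lower (PySem.Str.slice s (some (PySem.Str.len pre)) none)
      = String.ofList (PySem.Chars.lower r0) := by
  rw [← String.toList_inj]
  rw [PySem.Str.toList_lower, PySem.Str.toList_slice, PySem.Chars.slice_eq_listSlice,
    PySem.Str.len_eq, PySem.List.slice_from_natCast, hs, List.drop_left, String.toList_ofList]

theorem A_partition_eval (s pre : String) (r0 : List Char)
    (hs : s.toList = pre.toList ++ r0) (sp : String) (hsp : sp = ":" ∨ sp = "=")
    (pc : Nat)
    (hfind : PySem.Str.find s sp = ((pre.toList.length + pc : Nat) : Int)) :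
    (some (PySem.Str.lower (PySem.Str.slice (pyPartition s sp).1 (some (PySem.Str.len pre)) none)),
      some (pyPartition s sp).2.2)
    = ((some (String.ofList (PySem.Chars.lower (r0.take pc))) : Option String),
       (some (String.ofList (r0.drop (pc + 1))) : Option String)) := by
  have hlsp : PySem.Str.len sp = 1 := by rcases hsp with h | h <;> subst h <;> decide
  have hne : ¬ (PySem.Str.find s sp = -1) := by rw [hfind]; omega
  have hpart : pyPartition s sp =
      (PySem.Str.slice s none (some ((pre.toList.length + pc : Nat) : Int)), sp,
       PySem.Str.slice s (some (((pre.toList.length + pc : Nat) : Int) + 1)) none) := by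
    unfold pyPartition
    rw [hfind, hlsp, if_neg (by omega : ¬ (((pre.toList.length + pc : Nat) : Int) = -1))]
  rw [hpart]
  simp only [Prod.mk.injEq, Option.some.injEq]
  refine ⟨?_, ?_⟩
  have ht1 : (PySem.Str.slice s none (some ((pre.toList.length + pc : Nat) : Int))).toList
      = pre.toList ++ r0.take pc := by
    rw [PySem.Str.toList_slice, PySem.Chars.slice_eq_listSlice, PySem.List.slice_to_natCast,
      hs, List.take_append, List.take_of_length_le (by omega)]
    congr 1
    congr 1
    omega
  · rw [← String.toList_inj]
    rw [PySem.Str.toList_lower, PySem.Str.toList_slice, PySem.Chars.slice_eq_listSlice,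
      PySem.Str.len_eq, PySem.List.slice_from_natCast, ht1, List.drop_left,
      String.toList_ofList]
  · rw [← String.toList_inj]
    have : (((pre.toList.length + pc : Nat) : Int) + 1) = ((pre.toList.length + pc + 1 : Nat) : Int) := by push_cast; ring
    rw [this, PySem.Str.toList_slice, PySem.Chars.slice_eq_listSlice,
      PySem.List.slice_from_natCast, hs, List.drop_append,
      List.drop_eq_nil_of_le (by omega), String.toList_ofList]
    simp only [List.nil_append]
    congr 1
    omega

theorem find_char_append (pre r0 : List Char) (c : Char) (h : c ∉ pre) :
    PySem.Chars.find (pre ++ r0) [c] =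
      (match r0.findIdx? (fun x => x == c) with
        | none => -1
        | some i => ((i + pre.length : Nat) : Int)) := by
  rw [find_singleton, findIdx?_append_left_none _ _
    (fun x hx => by simp only [beq_eq_false_iff_ne, ne_eq]; rintro rfl; exact h hx)]
  cases r0.findIdx? (fun x => x == c) <;> simp

theorem badRest_true (c0 : Char) (cs : List Char) (hc0 : sepChar c0 = true) (i : Nat)
    (hfi : cs.findIdx? sepChar = some i) (hci : cs[i]? = some c0) :
    badRest (c0 :: cs) = true := by
  simp [badRest, hc0, hfi, hci]

theorem startswith_iff_prefix (s p : String) :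
    PySem.Str.startswith s p = true ↔ p.toList <+: s.toList := by
  rw [PySem.Str.startswith_eq]
  exact PySem.Chars.startswith_iff _ _

theorem isPrefixOf_eq_startswith (s p : String) :
    p.toList.isPrefixOf s.toList = PySem.Str.startswith s p := by
  rw [Bool.eq_iff_iff, List.isPrefixOf_iff_prefix, startswith_iff_prefix]

theorem sepChar_eq_or : sepChar = (fun c => c == ':' || c == '=') := rfl

-- the two then-branches agree for any admissible prefix, outside the bad region
theorem branch_eq (s pre : String) (r0 : List Char)
    (hs : s.toList = pre.toList ++ r0)
    (h1 : ':' ∉ pre.toList) (h2 : '=' ∉ pre.toList)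
    (hbad : badRest r0 = false) :
    (match (PySem.List.sorted2
        [(PySem.Str.find s ":", (":" : String)), (PySem.Str.find s "=", "=")]
        Prod.fst Prod.snd).findSome?
        (fun i => if i.1 > PySem.Str.len pre then some i.2 else none) with
     | some sp =>
        (some (PySem.Str.lower (PySem.Str.slice (pyPartition s sp).1 (some (PySem.Str.len pre)) none)),
         some (pyPartition s sp).2.2)
     | none =>
        (some (PySem.Str.lower (PySem.Str.slice s (some (PySem.Str.len pre)) none)), none))
    = (match PySem.Chars.slice s.toList (some (PySem.Str.len pre)) none with
       | [] => (some (String.ofList (PySem.Chars.lower [])), none)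
       | c0 :: cs =>
         match altScan cs with
         | some (preName, post) =>
             (some (String.ofList (PySem.Chars.lower (c0 :: preName))), some (String.ofList post))
         | none => (some (String.ofList (PySem.Chars.lower (c0 :: cs))), none)) := by
  have hlen : PySem.Str.len pre = (pre.toList.length : Int) := PySem.Str.len_eq pre
  have hr : PySem.Chars.slice s.toList (some (PySem.Str.len pre)) none = r0 := by
    rw [hlen, PySem.Chars.slice_eq_listSlice, PySem.List.slice_from_natCast, hs, List.drop_left]
  have hfc : PySem.Str.find s ":" =
      (match r0.findIdx? (fun x => x == ':') with
        | none => -1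
        | some i => ((i + pre.toList.length : Nat) : Int)) := by
    rw [PySem.Str.find_eq, show (":" : String).toList = [':'] from by decide, hs]
    exact find_char_append _ _ _ h1
  have hfe : PySem.Str.find s "=" =
      (match r0.findIdx? (fun x => x == '=') with
        | none => -1
        | some i => ((i + pre.toList.length : Nat) : Int)) := by
    rw [PySem.Str.find_eq, show ("=" : String).toList = ['='] from by decide, hs]
    exact find_char_append _ _ _ h2
  rw [hr]
  cases r0 with
  | nil =>
    simp only [List.findIdx?_nil] at hfc hfe
    rw [hfc, hfe, sep_eval _ _ _ (fun _ => by omega),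
      if_neg (by omega), if_neg (by omega)]
    rw [A_none_eval s pre [] hs]
  | cons c0 cs =>
    conv_rhs => whnf
    rw [altScan_eq, sepChar_eq_or, findIdx?_or_merge]
    by_cases hc : c0 = ':'
    · subst hc
      have hjc : List.findIdx? (fun x => x == ':') (':' :: cs) = some 0 := by
        simp [List.findIdx?_cons]
      have hje : List.findIdx? (fun x => x == '=') (':' :: cs)
          = (cs.findIdx? (fun x => x == '=')).map (· + 1) := by
        simp [List.findIdx?_cons]
      rw [hjc] at hfc
      rw [hje] at hfe
      replace hfc : PySem.Str.find s ":" = ((0 + pre.toList.length : Nat) : Int) := by rw [hfc]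
      cases hkc : cs.findIdx? (fun x => x == ':') with
      | none =>
        cases hke : cs.findIdx? (fun x => x == '=') with
        | none =>
          rw [hke] at hfe
          replace hfe : PySem.Str.find s "=" = -1 := by rw [hfe]; rfl
          simp only [Option.map_none]
          rw [hfc, hfe, sep_eval _ _ _ (fun _ => by omega), if_neg (by omega), if_neg (by omega)]
          rw [A_none_eval s pre (':' :: cs) hs]
        | some m' =>
          rw [hke] at hfe
          replace hfe : PySem.Str.find s "=" = (((m' + 1) + pre.toList.length : Nat) : Int) := by rw [hfe]; rfl
          simp only [Option.map_some]
          rw [hfc, hfe, sep_eval _ _ _ (fun _ => by omega), if_neg (by omega), if_pos (by omega)]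
          conv_lhs => whnf
          conv_rhs => whnf
          rw [A_partition_eval s pre (':' :: cs) hs "=" (Or.inr rfl) (m' + 1)
            (by rw [hfe]; congr 1; omega)]
          simp [List.take_succ_cons, List.drop_succ_cons]
      | some m =>
        obtain ⟨hl, hp, _⟩ := List.findIdx?_eq_some_iff_getElem.mp hkc
        simp only [beq_iff_eq] at hp
        have hcm : cs[m]? = some ':' := by rw [List.getElem?_eq_getElem hl]; simp [hp]
        cases hke : cs.findIdx? (fun x => x == '=') with
        | none =>
          have hsep : cs.findIdx? sepChar = some m := by
            rw [sepChar_eq_or, findIdx?_or_merge, hkc, hke]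
          have hbt := badRest_true ':' cs (by decide) m hsep hcm
          rw [hbt] at hbad
          exact Bool.noConfusion hbad
        | some m' =>
          have hmm : m ≠ m' := by
            intro h
            subst h
            obtain ⟨hl2, hp2, _⟩ := List.findIdx?_eq_some_iff_getElem.mp hke
            simp only [beq_iff_eq] at hp2
            rw [hp] at hp2
            exact absurd hp2 (by decide)
          rcases Nat.lt_or_ge m m' with hlt | hge
          · have hsep : cs.findIdx? sepChar = some m := by
              rw [sepChar_eq_or, findIdx?_or_merge, hkc, hke]
              simp [Nat.min_eq_left (le_of_lt hlt)]
            have hbt := badRest_true ':' cs (by decide) m hsep hcm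
            rw [hbt] at hbad
            exact Bool.noConfusion hbad
          · have hlt' : m' < m := by omega
            rw [hke] at hfe
            replace hfe : PySem.Str.find s "=" = (((m' + 1) + pre.toList.length : Nat) : Int) := by rw [hfe]; rfl
            simp only [Option.map_some]
            rw [show min m m' = m' from by omega]
            rw [hfc, hfe, sep_eval _ _ _ (fun _ => by omega), if_neg (by omega), if_pos (by omega)]
            conv_lhs => whnf
            conv_rhs => whnf
            rw [A_partition_eval s pre (':' :: cs) hs "=" (Or.inr rfl) (m' + 1)
              (by rw [hfe]; congr 1; omega)]
            simp [List.take_succ_cons, List.drop_succ_cons]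
    · by_cases hd : c0 = '='
      · subst hd
        have hjc : List.findIdx? (fun x => x == ':') ('=' :: cs)
            = (cs.findIdx? (fun x => x == ':')).map (· + 1) := by
          simp [List.findIdx?_cons]
        have hje : List.findIdx? (fun x => x == '=') ('=' :: cs) = some 0 := by
          simp [List.findIdx?_cons]
        rw [hjc] at hfc
        rw [hje] at hfe
        replace hfe : PySem.Str.find s "=" = ((0 + pre.toList.length : Nat) : Int) := by rw [hfe]
        cases hke : cs.findIdx? (fun x => x == '=') with
        | none =>
          cases hkc : cs.findIdx? (fun x => x == ':') with
          | none =>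
            rw [hkc] at hfc
            replace hfc : PySem.Str.find s ":" = -1 := by rw [hfc]; rfl
            simp only [Option.map_none]
            rw [hfc, hfe, sep_eval _ _ _ (fun _ => by omega), if_neg (by omega), if_neg (by omega)]
            rw [A_none_eval s pre ('=' :: cs) hs]
          | some m =>
            rw [hkc] at hfc
            replace hfc : PySem.Str.find s ":" = (((m + 1) + pre.toList.length : Nat) : Int) := by rw [hfc]; rfl
            simp only [Option.map_some]
            rw [hfc, hfe, sep_eval _ _ _ (fun _ => by omega),
              if_pos (by refine ⟨by omega, Or.inl (by omega)⟩)]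
            conv_lhs => whnf
            conv_rhs => whnf
            rw [A_partition_eval s pre ('=' :: cs) hs ":" (Or.inl rfl) (m + 1)
              (by rw [hfc]; congr 1; omega)]
            simp [List.take_succ_cons, List.drop_succ_cons]
        | some m' =>
          obtain ⟨hl2, hp2, _⟩ := List.findIdx?_eq_some_iff_getElem.mp hke
          simp only [beq_iff_eq] at hp2
          have hcm : cs[m']? = some '=' := by rw [List.getElem?_eq_getElem hl2]; simp [hp2]
          cases hkc : cs.findIdx? (fun x => x == ':') with
          | none =>
            have hsep : cs.findIdx? sepChar = some m' := by
              rw [sepChar_eq_or, findIdx?_or_merge, hkc, hke]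
            have hbt := badRest_true '=' cs (by decide) m' hsep hcm
            rw [hbt] at hbad
            exact Bool.noConfusion hbad
          | some m =>
            have hmm : m ≠ m' := by
              intro h
              subst h
              obtain ⟨hl3, hp3, _⟩ := List.findIdx?_eq_some_iff_getElem.mp hkc
              simp only [beq_iff_eq] at hp3
              rw [hp3] at hp2
              exact absurd hp2 (by decide)
            rcases Nat.lt_or_ge m' m with hlt | hge
            · have hsep : cs.findIdx? sepChar = some m' := by
                rw [sepChar_eq_or, findIdx?_or_merge, hkc, hke]
                simp [Nat.min_eq_right (le_of_lt hlt)]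
              have hbt := badRest_true '=' cs (by decide) m' hsep hcm
              rw [hbt] at hbad
              exact Bool.noConfusion hbad
            · have hlt' : m < m' := by omega
              rw [hkc] at hfc
              replace hfc : PySem.Str.find s ":" = (((m + 1) + pre.toList.length : Nat) : Int) := by rw [hfc]; rfl
              simp only [Option.map_some]
              rw [show min m m' = m from by omega]
              rw [hfc, hfe, sep_eval _ _ _ (fun _ => by omega),
                if_pos (by refine ⟨by omega, Or.inl (by omega)⟩)]
              conv_lhs => whnf
              conv_rhs => whnf
              rw [A_partition_eval s pre ('=' :: cs) hs ":" (Or.inl rfl) (m + 1)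
                (by rw [hfc]; congr 1; omega)]
              simp [List.take_succ_cons, List.drop_succ_cons]
      · have hjc : List.findIdx? (fun x => x == ':') (c0 :: cs)
            = (cs.findIdx? (fun x => x == ':')).map (· + 1) := by
          simp [List.findIdx?_cons, hc]
        have hje : List.findIdx? (fun x => x == '=') (c0 :: cs)
            = (cs.findIdx? (fun x => x == '=')).map (· + 1) := by
          simp [List.findIdx?_cons, hd]
        rw [hjc] at hfc
        rw [hje] at hfe
        cases hkc : cs.findIdx? (fun x => x == ':') with
        | none =>
          cases hke : cs.findIdx? (fun x => x == '=') with
          | none =>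
            rw [hkc] at hfc
            rw [hke] at hfe
            replace hfc : PySem.Str.find s ":" = -1 := by rw [hfc]; rfl
            replace hfe : PySem.Str.find s "=" = -1 := by rw [hfe]; rfl
            simp only [Option.map_none]
            rw [hfc, hfe, sep_eval _ _ _ (fun _ => by omega), if_neg (by omega), if_neg (by omega)]
            rw [A_none_eval s pre (c0 :: cs) hs]
          | some m' =>
            rw [hkc] at hfc
            rw [hke] at hfe
            replace hfc : PySem.Str.find s ":" = -1 := by rw [hfc]; rfl
            replace hfe : PySem.Str.find s "=" = (((m' + 1) + pre.toList.length : Nat) : Int) := by rw [hfe]; rfl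
            simp only [Option.map_some]
            rw [hfc, hfe, sep_eval _ _ _ (fun _ => by omega), if_neg (by omega), if_pos (by omega)]
            conv_lhs => whnf
            conv_rhs => whnf
            rw [A_partition_eval s pre (c0 :: cs) hs "=" (Or.inr rfl) (m' + 1)
              (by rw [hfe]; congr 1; omega)]
            simp [List.take_succ_cons, List.drop_succ_cons]
        | some m =>
          cases hke : cs.findIdx? (fun x => x == '=') with
          | none =>
            rw [hkc] at hfc
            rw [hke] at hfe
            replace hfc : PySem.Str.find s ":" = (((m + 1) + pre.toList.length : Nat) : Int) := by rw [hfc]; rfl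
            replace hfe : PySem.Str.find s "=" = -1 := by rw [hfe]; rfl
            simp only [Option.map_some]
            rw [hfc, hfe, sep_eval _ _ _ (fun _ => by omega),
              if_pos (by refine ⟨by omega, Or.inl (by omega)⟩)]
            conv_lhs => whnf
            conv_rhs => whnf
            rw [A_partition_eval s pre (c0 :: cs) hs ":" (Or.inl rfl) (m + 1)
              (by rw [hfc]; congr 1; omega)]
            simp [List.take_succ_cons, List.drop_succ_cons]
          | some m' =>
            have hmm : m ≠ m' := by
              intro h
              subst h
              obtain ⟨hl, hp, _⟩ := List.findIdx?_eq_some_iff_getElem.mp hkc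
              obtain ⟨hl2, hp2, _⟩ := List.findIdx?_eq_some_iff_getElem.mp hke
              simp only [beq_iff_eq] at hp hp2
              rw [hp] at hp2
              exact absurd hp2 (by decide)
            rw [hkc] at hfc
            rw [hke] at hfe
            replace hfc : PySem.Str.find s ":" = (((m + 1) + pre.toList.length : Nat) : Int) := by rw [hfc]; rfl
            replace hfe : PySem.Str.find s "=" = (((m' + 1) + pre.toList.length : Nat) : Int) := by rw [hfe]; rfl
            simp only [Option.map_some]
            rcases Nat.lt_or_ge m m' with hlt | hge
            · rw [show min m m' = m from by omega, hfc, hfe, sep_eval _ _ _ (fun hq => by omega),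
                if_pos (by refine ⟨by omega, Or.inr (by omega)⟩)]
              conv_lhs => whnf
              conv_rhs => whnf
              rw [A_partition_eval s pre (c0 :: cs) hs ":" (Or.inl rfl) (m + 1)
                (by rw [hfc]; congr 1; omega)]
              simp [List.take_succ_cons, List.drop_succ_cons]
            · have hlt : m' < m := by omega
              rw [show min m m' = m' from by omega, hfc, hfe, sep_eval _ _ _ (fun hq => by omega),
                if_neg (by omega), if_pos (by omega)]
              conv_lhs => whnf
              conv_rhs => whnf
              rw [A_partition_eval s pre (c0 :: cs) hs "=" (Or.inr rfl) (m' + 1)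
                (by rw [hfe]; congr 1; omega)]
              simp [List.take_succ_cons, List.drop_succ_cons]

theorem loop_eq (s : String) (hnd : ¬ D_read_arg_py s) :
    readArgLoopA s ["--", "-", "/"] = readArgLoopB s ["--", "-", "/"] := by
  unfold D_read_arg_py at hnd
  rw [show ['-', '-'] = ("--" : String).toList from rfl,
    show ['-'] = ("-" : String).toList from rfl,
    show ['/'] = ("/" : String).toList from rfl,
    isPrefixOf_eq_startswith, isPrefixOf_eq_startswith, isPrefixOf_eq_startswith] at hnd
  by_cases h2 : PySem.Str.startswith s "--" = true
  · obtain ⟨r0, hr0⟩ := (startswith_iff_prefix s "--").mp h2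
    have hsEq : s.toList = ("--" : String).toList ++ r0 := hr0.symm
    have hdrop : s.toList.drop 2 = r0 := by rw [hsEq]; rfl
    rw [h2] at hnd
    rw [if_pos rfl, hdrop] at hnd
    have hbad : badRest r0 = false := by
      cases hb : badRest r0 with
      | false => rfl
      | true => exact absurd hb hnd
    rw [readArgLoopA, readArgLoopB, if_pos h2, if_pos h2]
    exact branch_eq s "--" r0 hsEq (by decide) (by decide) hbad
  · rw [Bool.not_eq_true] at h2
    rw [h2] at hnd
    rw [if_neg (by simp)] at hnd
    rw [readArgLoopA, readArgLoopB, if_neg (by rw [h2]; simp), if_neg (by rw [h2]; simp)]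
    by_cases h1 : PySem.Str.startswith s "-" = true
    · obtain ⟨r0, hr0⟩ := (startswith_iff_prefix s "-").mp h1
      have hsEq : s.toList = ("-" : String).toList ++ r0 := hr0.symm
      have hdrop : s.toList.drop 1 = r0 := by rw [hsEq]; rfl
      rw [h1] at hnd
      rw [if_pos rfl, hdrop] at hnd
      have hbad : badRest r0 = false := by
        cases hb : badRest r0 with
        | false => rfl
        | true => exact absurd hb hnd
      rw [readArgLoopA, readArgLoopB, if_pos h1, if_pos h1]
      exact branch_eq s "-" r0 hsEq (by decide) (by decide) hbad
    · rw [Bool.not_eq_true] at h1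
      rw [h1] at hnd
      rw [if_neg (by simp)] at hnd
      rw [readArgLoopA, readArgLoopB, if_neg (by rw [h1]; simp), if_neg (by rw [h1]; simp)]
      by_cases h0 : PySem.Str.startswith s "/" = true
      · obtain ⟨r0, hr0⟩ := (startswith_iff_prefix s "/").mp h0
        have hsEq : s.toList = ("/" : String).toList ++ r0 := hr0.symm
        have hdrop : s.toList.drop 1 = r0 := by rw [hsEq]; rfl
        rw [h0] at hnd
        rw [if_pos rfl, hdrop] at hnd
        have hbad : badRest r0 = false := by
          cases hb : badRest r0 with
          | false => rfl
          | true => exact absurd hb hnd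
        rw [readArgLoopA, readArgLoopB, if_pos h0, if_pos h0]
        exact branch_eq s "/" r0 hsEq (by decide) (by decide) hbad
      · rw [readArgLoopA, readArgLoopB, if_neg h0, if_neg h0]
        rfl

theorem pair_ne (xs ys : List Char) (v1 v2 : Option String)
    (h : xs.length ≠ ys.length) :
    ((some (String.ofList (PySem.Chars.lower xs)) : Option String), v1)
      ≠ ((some (String.ofList (PySem.Chars.lower ys)) : Option String), v2) := by
  intro he
  apply h
  have h2 := congrArg (fun p : Option String × Option String =>
    (p.1.map (fun t => t.toList.length))) he
  simpa [PySem.Chars.lower] using h2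

-- inside the bad region the two then-branches always disagree (first components
-- have different lengths)
theorem branch_ne (s pre : String) (r0 : List Char)
    (hs : s.toList = pre.toList ++ r0)
    (h1 : ':' ∉ pre.toList) (h2 : '=' ∉ pre.toList)
    (hbad : badRest r0 = true) :
    (match (PySem.List.sorted2
        [(PySem.Str.find s ":", (":" : String)), (PySem.Str.find s "=", "=")]
        Prod.fst Prod.snd).findSome?
        (fun i => if i.1 > PySem.Str.len pre then some i.2 else none) with
     | some sp =>
        (some (PySem.Str.lower (PySem.Str.slice (pyPartition s sp).1 (some (PySem.Str.len pre)) none)),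
         some (pyPartition s sp).2.2)
     | none =>
        (some (PySem.Str.lower (PySem.Str.slice s (some (PySem.Str.len pre)) none)), none))
    ≠ (match PySem.Chars.slice s.toList (some (PySem.Str.len pre)) none with
       | [] => (some (String.ofList (PySem.Chars.lower [])), none)
       | c0 :: cs =>
         match altScan cs with
         | some (preName, post) =>
             (some (String.ofList (PySem.Chars.lower (c0 :: preName))), some (String.ofList post))
         | none => (some (String.ofList (PySem.Chars.lower (c0 :: cs))), none)) := by
  have hlen : PySem.Str.len pre = (pre.toList.length : Int) := PySem.Str.len_eq pre
  have hr : PySem.Chars.slice s.toList (some (PySem.Str.len pre)) none = r0 := by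
    rw [hlen, PySem.Chars.slice_eq_listSlice, PySem.List.slice_from_natCast, hs, List.drop_left]
  have hfc : PySem.Str.find s ":" =
      (match r0.findIdx? (fun x => x == ':') with
        | none => -1
        | some i => ((i + pre.toList.length : Nat) : Int)) := by
    rw [PySem.Str.find_eq, show (":" : String).toList = [':'] from by decide, hs]
    exact find_char_append _ _ _ h1
  have hfe : PySem.Str.find s "=" =
      (match r0.findIdx? (fun x => x == '=') with
        | none => -1
        | some i => ((i + pre.toList.length : Nat) : Int)) := by
    rw [PySem.Str.find_eq, show ("=" : String).toList = ['='] from by decide, hs]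
    exact find_char_append _ _ _ h2
  rw [hr]
  cases r0 with
  | nil => exact absurd hbad (by simp [badRest])
  | cons c0 cs =>
    simp only [badRest, Bool.and_eq_true] at hbad
    obtain ⟨hc0, hrest⟩ := hbad
    cases hsep : cs.findIdx? sepChar with
    | none => rw [hsep] at hrest; exact absurd hrest (by simp)
    | some i =>
      rw [hsep] at hrest
      have hci : cs[i]? = some c0 := by simpa using hrest
      obtain ⟨hil, hip, hminI⟩ := List.findIdx?_eq_some_iff_getElem.mp hsep
      have hciv : cs[i] = c0 := by
        rw [List.getElem?_eq_getElem hil] at hci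
        simpa using hci
      conv_rhs => whnf
      rw [altScan_eq, hsep]
      simp only [Option.map_some]
      conv_rhs => whnf
      have hc0' : c0 = ':' ∨ c0 = '=' := by
        rcases Bool.or_eq_true_iff.mp hc0 with h | h
        · exact Or.inl (by simpa using h)
        · exact Or.inr (by simpa using h)
      rcases hc0' with rfl | rfl
      · have hjc : List.findIdx? (fun x => x == ':') (':' :: cs) = some 0 := by
          simp [List.findIdx?_cons]
        have hje : List.findIdx? (fun x => x == '=') (':' :: cs)
            = (cs.findIdx? (fun x => x == '=')).map (· + 1) := by
          simp [List.findIdx?_cons]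
        rw [hjc] at hfc
        rw [hje] at hfe
        replace hfc : PySem.Str.find s ":" = ((0 + pre.toList.length : Nat) : Int) := by rw [hfc]
        cases hke : cs.findIdx? (fun x => x == '=') with
        | none =>
          rw [hke] at hfe
          replace hfe : PySem.Str.find s "=" = -1 := by rw [hfe]; rfl
          rw [hfc, hfe, sep_eval _ _ _ (fun _ => by omega), if_neg (by omega), if_neg (by omega)]
          rw [A_none_eval s pre (':' :: cs) hs]
          exact pair_ne _ _ _ _ (by simp [List.length_take]; omega)
        | some m' =>
          obtain ⟨hl2, hp2, hmin2⟩ := List.findIdx?_eq_some_iff_getElem.mp hke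
          simp only [beq_iff_eq] at hp2
          have him : i < m' := by
            rcases Nat.lt_trichotomy i m' with h | h | h
            · exact h
            · have hq : cs[m']? = some '=' := by
                rw [List.getElem?_eq_getElem hl2]; simp [hp2]
              rw [← h] at hq
              rw [hci] at hq
              exact absurd hq (by decide)
            · have := hminI m' h
              rw [sepChar] at this
              simp [hp2] at this
          rw [hke] at hfe
          replace hfe : PySem.Str.find s "=" = (((m' + 1) + pre.toList.length : Nat) : Int) := by rw [hfe]; rfl
          rw [hfc, hfe, sep_eval _ _ _ (fun _ => by omega), if_neg (by omega), if_pos (by omega)]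
          conv_lhs => whnf
          rw [A_partition_eval s pre (':' :: cs) hs "=" (Or.inr rfl) (m' + 1)
            (by rw [hfe]; congr 1; omega)]
          have htk : (':' :: cs).take (m' + 1) = ':' :: cs.take m' := by
            simp [List.take_succ_cons]
          rw [htk]
          exact pair_ne _ _ _ _ (by simp [List.length_take]; omega)
      · have hjc : List.findIdx? (fun x => x == ':') ('=' :: cs)
            = (cs.findIdx? (fun x => x == ':')).map (· + 1) := by
          simp [List.findIdx?_cons]
        have hje : List.findIdx? (fun x => x == '=') ('=' :: cs) = some 0 := by
          simp [List.findIdx?_cons]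
        rw [hjc] at hfc
        rw [hje] at hfe
        replace hfe : PySem.Str.find s "=" = ((0 + pre.toList.length : Nat) : Int) := by rw [hfe]
        cases hkc : cs.findIdx? (fun x => x == ':') with
        | none =>
          rw [hkc] at hfc
          replace hfc : PySem.Str.find s ":" = -1 := by rw [hfc]; rfl
          rw [hfc, hfe, sep_eval _ _ _ (fun _ => by omega), if_neg (by omega), if_neg (by omega)]
          rw [A_none_eval s pre ('=' :: cs) hs]
          exact pair_ne _ _ _ _ (by simp [List.length_take]; omega)
        | some m =>
          obtain ⟨hl2, hp2, hmin2⟩ := List.findIdx?_eq_some_iff_getElem.mp hkc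
          simp only [beq_iff_eq] at hp2
          have him : i < m := by
            rcases Nat.lt_trichotomy i m with h | h | h
            · exact h
            · have hq : cs[m]? = some ':' := by
                rw [List.getElem?_eq_getElem hl2]; simp [hp2]
              rw [← h] at hq
              rw [hci] at hq
              exact absurd hq (by decide)
            · have := hminI m h
              rw [sepChar] at this
              simp [hp2] at this
          rw [hkc] at hfc
          replace hfc : PySem.Str.find s ":" = (((m + 1) + pre.toList.length : Nat) : Int) := by rw [hfc]; rfl
          rw [hfc, hfe, sep_eval _ _ _ (fun _ => by omega),
            if_pos (by refine ⟨by omega, Or.inl (by omega)⟩)]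
          conv_lhs => whnf
          rw [A_partition_eval s pre ('=' :: cs) hs ":" (Or.inl rfl) (m + 1)
            (by rw [hfc]; congr 1; omega)]
          have htk : ('=' :: cs).take (m + 1) = '=' :: cs.take m := by
            simp [List.take_succ_cons]
          rw [htk]
          exact pair_ne _ _ _ _ (by simp [List.length_take]; omega)

theorem loop_ne (s : String) (hd : D_read_arg_py s) :
    readArgLoopA s ["--", "-", "/"] ≠ readArgLoopB s ["--", "-", "/"] := by
  unfold D_read_arg_py at hd
  rw [show ['-', '-'] = ("--" : String).toList from rfl,
    show ['-'] = ("-" : String).toList from rfl,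
    show ['/'] = ("/" : String).toList from rfl,
    isPrefixOf_eq_startswith, isPrefixOf_eq_startswith, isPrefixOf_eq_startswith] at hd
  by_cases h2 : PySem.Str.startswith s "--" = true
  · obtain ⟨r0, hr0⟩ := (startswith_iff_prefix s "--").mp h2
    have hsEq : s.toList = ("--" : String).toList ++ r0 := hr0.symm
    have hdrop : s.toList.drop 2 = r0 := by rw [hsEq]; rfl
    rw [h2] at hd
    rw [if_pos rfl, hdrop] at hd
    rw [readArgLoopA, readArgLoopB, if_pos h2, if_pos h2]
    exact branch_ne s "--" r0 hsEq (by decide) (by decide) hd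
  · rw [Bool.not_eq_true] at h2
    rw [h2] at hd
    rw [if_neg (by simp)] at hd
    rw [readArgLoopA, readArgLoopB, if_neg (by rw [h2]; simp), if_neg (by rw [h2]; simp)]
    by_cases h1 : PySem.Str.startswith s "-" = true
    · obtain ⟨r0, hr0⟩ := (startswith_iff_prefix s "-").mp h1
      have hsEq : s.toList = ("-" : String).toList ++ r0 := hr0.symm
      have hdrop : s.toList.drop 1 = r0 := by rw [hsEq]; rfl
      rw [h1] at hd
      rw [if_pos rfl, hdrop] at hd
      rw [readArgLoopA, readArgLoopB, if_pos h1, if_pos h1]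
      exact branch_ne s "-" r0 hsEq (by decide) (by decide) hd
    · rw [Bool.not_eq_true] at h1
      rw [h1] at hd
      rw [if_neg (by simp)] at hd
      rw [readArgLoopA, readArgLoopB, if_neg (by rw [h1]; simp), if_neg (by rw [h1]; simp)]
      by_cases h0 : PySem.Str.startswith s "/" = true
      · obtain ⟨r0, hr0⟩ := (startswith_iff_prefix s "/").mp h0
        have hsEq : s.toList = ("/" : String).toList ++ r0 := hr0.symm
        have hdrop : s.toList.drop 1 = r0 := by rw [hsEq]; rfl
        rw [h0] at hd
        rw [if_pos rfl, hdrop] at hd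
        rw [readArgLoopA, readArgLoopB, if_pos h0, if_pos h0]
        exact branch_ne s "/" r0 hsEq (by decide) (by decide) hd
      · rw [Bool.not_eq_true] at h0
        rw [h0] at hd
        rw [if_neg (by simp)] at hd
        exact absurd hd (by simp)

-- ===== VERDICT (by name: the statement is the Claim_ definition above) =====
theorem read_arg_py_spec : Claim_unchanged_read_arg_py := by
  intro s _ hnd
  unfold read_arg_py read_arg_py_alt
  exact loop_eq s hnd

theorem read_arg_py_changed : Claim_changed_read_arg_py := by
  unfold Claim_changed_read_arg_py; decide

theorem read_arg_py_tight : Claim_exact_read_arg_py := by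
  intro s _ hd
  unfold read_arg_py read_arg_py_alt
  exact loop_ne s hd
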